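-- pv_equiv track=rewrite | github.com/mrkolarik/la_contextressa | ms-coco/load_json.py | clean_descriptions
-- ===== SOURCE A (Python) =====
-- import json, random, pprint, string
--
-- def clean_descriptions(desc):
--     # prepare translation table for removing punctuation
--     table = str.maketrans('', '', string.punctuation)
--     # for key, desc_list in descriptions.items():
--     #     for i in range(len(desc_list)):
--     # desc = desc_list[i]
--     # tokenize
--     desc = desc.split()
--     # convert to lower case
--     desc = [word.lower() for word in desc]
--     # remove punctuation from each token
--     desc = [w.translate(table) for w in desc]
--     # remove hanging 's' and 'a'
--     desc = [word for word in desc if len(word) > 1]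
--     # remove tokens with numbers in them
--     desc = [word for word in desc if word.isalpha()]
--     # store as string
--     return ' '.join(desc[:min(len(desc),20)])
-- ===== SOURCE B (Python) =====
-- import string
--
-- def clean_descriptions(desc):
--     # character-level state machine: one pass over the characters themselves,
--     # no tokenize/lower/translate/filter/slice pipeline over word lists
--     punct = set(string.punctuation)
--     out = []            # cleaned words kept so far
--     cur = []            # cleaned chars of the word in progress
--     alpha_ok = True     # every cleaned char so far is a letter
--     for c in desc + " ":                  # sentinel blank flushes the last word
--         if c.isspace():
--             if len(cur) > 1 and alpha_ok:
--                 out.append(''.join(cur))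
--                 if len(out) == 20:
--                     break
--             cur = []
--             alpha_ok = True
--         elif c in punct:
--             continue
--         else:
--             c = c.lower()
--             cur.append(c)
--             alpha_ok = alpha_ok and c.isalpha()
--     return ' '.join(out)
-- ===== Notes on version B (the rewrite author's own statement) =====
-- stated objective: alternative
-- what changed: Replaced A's five-stage word-list pipeline (split, map lower, map translate, two filters, slice, join) by a character-level state machine that streams once over the characters, building each cleaned word and an is-all-alpha flag in place, emitting kept words and stopping at 20.
import Mathlib
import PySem

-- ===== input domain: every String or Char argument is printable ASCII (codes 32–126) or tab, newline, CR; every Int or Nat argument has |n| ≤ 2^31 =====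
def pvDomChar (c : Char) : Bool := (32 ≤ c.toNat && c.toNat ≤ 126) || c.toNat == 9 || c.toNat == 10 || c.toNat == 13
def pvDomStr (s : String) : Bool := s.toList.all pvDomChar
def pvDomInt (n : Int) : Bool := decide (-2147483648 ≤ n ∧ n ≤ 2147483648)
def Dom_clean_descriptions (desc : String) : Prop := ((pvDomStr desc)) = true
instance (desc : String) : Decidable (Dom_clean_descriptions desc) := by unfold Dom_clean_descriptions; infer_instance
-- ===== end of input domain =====

-- B replaces A's tokenize/lower/translate/filter/slice pipeline over word lists by a
-- character-level state machine that streams once over the characters (alternative, same cost).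


-- ===== PORT A =====
-- string.punctuation membership, by ASCII code ranges (exact: !"#$%&'()*+,-./:;<=>?@[\]^_`{|}~)
def pvIsPunct (c : Char) : Bool :=
  (33 ≤ c.toNat && c.toNat ≤ 47) || (58 ≤ c.toNat && c.toNat ≤ 64) ||
  (91 ≤ c.toNat && c.toNat ≤ 96) || (123 ≤ c.toNat && c.toNat ≤ 126)

-- w.translate(str.maketrans('', '', string.punctuation)): hand port, exact — the table maps
-- exactly the punctuation characters to None (deletion) and leaves every other char unchanged.
def pvTranslateDelPunct (w : List Char) : List Char := w.filter (fun c => !pvIsPunct c)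

def clean_descriptions (desc : String) : String :=
  let ws := PySem.Chars.split₀ desc.toList                       -- desc.split()
  let ws := ws.map PySem.Chars.lower                             -- [word.lower() for word in desc]
  let ws := ws.map pvTranslateDelPunct                           -- [w.translate(table) for w in desc]
  let ws := ws.filter (fun w => decide (1 < PySem.Chars.len w))  -- if len(word) > 1
  let ws := ws.filter (fun w => PySem.Chars.strIsalpha w)        -- if word.isalpha()
  String.ofList (PySem.Chars.join [' ']
    (PySem.List.slice ws none (some (min (ws.length : Int) 20))))  -- ' '.join(desc[:min(len(desc),20)])

-- ===== PORT B =====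
-- the for-loop of Source B: state (out, cur, alpha_ok), one step per character
def pvScan : List Char → List (List Char) → List Char → Bool → List (List Char)
  | [], out, _, _ => out
  | c :: rest, out, cur, ok =>
    if PySem.Chars.isspace c then                                -- if c.isspace():
      if decide (1 < cur.length) && ok then                      --   if len(cur) > 1 and alpha_ok:
        if (out ++ [cur]).length = 20 then out ++ [cur]          --     out.append(...); if len(out) == 20: break
        else pvScan rest (out ++ [cur]) [] true
      else pvScan rest out [] true                               --   cur = []; alpha_ok = True
    else if pvIsPunct c then pvScan rest out cur ok              -- elif c in punct: continue
    else pvScan rest out (cur ++ [PySem.Chars.lowerChar c])      -- else: c = c.lower(); cur.append(c)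
         (ok && PySem.Chars.isalpha (PySem.Chars.lowerChar c))   --   alpha_ok = alpha_ok and c.isalpha()

def clean_descriptions_alt (desc : String) : String :=
  String.ofList (PySem.Chars.join [' ']
    (pvScan (desc.toList ++ [' ']) [] [] true))                  -- for c in desc + " "; ' '.join(out)

-- ===== PRECONDITION & SPEC =====
def Spec_clean_descriptions (desc : String) (out : String) : Prop := out = clean_descriptions_alt desc
instance (desc : String) (out : String) : Decidable (Spec_clean_descriptions desc out) := by unfold Spec_clean_descriptions; infer_instance

-- ===== CLAIM (what is proved, stated in full; the proofs are below) =====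
def Claim_equal_clean_descriptions : Prop := ∀ (desc : String), Dom_clean_descriptions desc → Spec_clean_descriptions desc (clean_descriptions desc)

-- ===== LEMMAS AND PROOFS =====
-- the per-word cleaning and keep test of A's pipeline, as proof-only abbreviations
def pvClean (w : List Char) : List Char := pvTranslateDelPunct (PySem.Chars.lower w)
def pvKeep (w : List Char) : Bool := decide (1 < PySem.Chars.len w) && PySem.Chars.strIsalpha w
-- the clean of a word as the machine builds it: delete punctuation, then lower the kept chars
def pvMClean (w : List Char) : List Char :=
  (w.filter (fun c => !pvIsPunct c)).map PySem.Chars.lowerChar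

theorem pvIsPunct_lowerChar (c : Char) : pvIsPunct (PySem.Chars.lowerChar c) = pvIsPunct c := by
  unfold PySem.Chars.lowerChar PySem.Chars.isupper
  split_ifs with h
  · simp only [Bool.and_eq_true, decide_eq_true_eq, Char.le_def] at h
    obtain ⟨h1, h2⟩ := h
    have h1' : 65 ≤ c.toNat := h1
    have h2' : c.toNat ≤ 90 := h2
    have hv : (Char.ofNat (c.toNat + 32)).toNat = c.toNat + 32 := by
      rw [Char.toNat_ofNat]
      have : (c.toNat + 32).isValidChar := by left; omega
      simp [this]
    have l : pvIsPunct (Char.ofNat (c.toNat + 32)) = false := by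
      simp [pvIsPunct, hv]; omega
    have r : pvIsPunct c = false := by
      simp [pvIsPunct]; omega
    rw [l, r]
  · rfl

theorem pvMClean_eq_pvClean (w : List Char) : pvMClean w = pvClean w := by
  unfold pvMClean pvClean pvTranslateDelPunct PySem.Chars.lower
  rw [List.filter_map]
  congr 1
  apply List.filter_congr
  intro c _
  simp [Function.comp, pvIsPunct_lowerChar]

theorem pvKeep_eq (w : List Char) :
    pvKeep w = (decide (1 < w.length) && w.all PySem.Chars.isalpha) := by
  cases w with
  | nil => rfl
  | cons c t =>
    simp only [pvKeep, PySem.Chars.strIsalpha, PySem.Chars.len, List.isEmpty_cons,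
      Bool.not_false, Bool.true_and]
    norm_cast

theorem go_acc (s : List Char) : ∀ (cur : List Char) (acc : List (List Char)),
    PySem.Chars.split₀.go s cur acc = acc.reverse ++ PySem.Chars.split₀.go s cur [] := by
  induction s with
  | nil =>
    intro cur acc
    simp only [PySem.Chars.split₀.go]
    split_ifs <;> simp
  | cons c rest ih =>
    intro cur acc
    simp only [PySem.Chars.split₀.go]
    split_ifs with h1 h2
    · exact ih [] acc
    · rw [ih [] (cur.reverse :: acc), ih [] [cur.reverse]]
      simp
    · exact ih (c :: cur) acc

theorem pvMClean_nil : pvMClean [] = [] := rfl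

theorem pvKeep_mclean_ne_nil {rcur : List Char} (h : pvKeep (pvMClean rcur.reverse) = true) :
    rcur.isEmpty = false := by
  cases rcur with
  | nil => simp [pvMClean, pvKeep] at h
  | cons a t => rfl

theorem pvScan_eq (s : List Char) : ∀ (rcur : List Char) (out : List (List Char)),
    out.length < 20 →
    pvScan (s ++ [' ']) out (pvMClean rcur.reverse) ((pvMClean rcur.reverse).all PySem.Chars.isalpha)
      = out ++ (((PySem.Chars.split₀.go s rcur []).map pvClean).filter pvKeep).take (20 - out.length) := by
  induction s with
  | nil =>
    intro rcur out hout
    simp only [List.nil_append, pvScan, PySem.Chars.split₀.go]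
    rw [if_pos (show PySem.Chars.isspace ' ' = true by decide), ← pvKeep_eq]
    by_cases hk : pvKeep (pvMClean rcur.reverse) = true
    · rw [if_pos hk, pvKeep_mclean_ne_nil hk]
      simp only [Bool.false_eq_true, if_false, List.reverse_cons, List.reverse_nil,
        List.nil_append, List.map_cons, List.map_nil, List.filter_cons]
      rw [← pvMClean_eq_pvClean, hk]
      simp only [if_pos, List.filter_nil]
      have h1 : 20 - out.length = (19 - out.length) + 1 := by omega
      rw [h1, List.take_succ_cons, List.take_nil]
      split_ifs <;> rfl
    · rw [if_neg hk]
      cases hre : rcur.isEmpty with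
      | true => simp
      | false =>
        simp only [Bool.false_eq_true, if_false, List.reverse_cons, List.reverse_nil,
          List.nil_append, List.map_cons, List.map_nil, List.filter_cons]
        rw [← pvMClean_eq_pvClean]
        simp [hk]
  | cons c rest ih =>
    intro rcur out hout
    rw [List.cons_append]
    by_cases hsp : PySem.Chars.isspace c = true
    · simp only [pvScan, PySem.Chars.split₀.go]
      rw [if_pos hsp, if_pos hsp, ← pvKeep_eq]
      by_cases hk : pvKeep (pvMClean rcur.reverse) = true
      · rw [if_pos hk, pvKeep_mclean_ne_nil hk]
        simp only [Bool.false_eq_true, if_false]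
        rw [go_acc rest [] [rcur.reverse]]
        simp only [List.reverse_cons, List.reverse_nil, List.nil_append, List.cons_append,
          List.map_cons, List.filter_cons]
        rw [← pvMClean_eq_pvClean, hk]
        simp only [if_pos]
        have h20 : 20 - out.length = (19 - out.length) + 1 := by omega
        rw [h20, List.take_succ_cons]
        by_cases hl : (out ++ [pvMClean rcur.reverse]).length = 20
        · rw [if_pos hl]
          have : 19 - out.length = 0 := by simp at hl; omega
          rw [this]
          simp
        · rw [if_neg hl]
          have hlt : (out ++ [pvMClean rcur.reverse]).length < 20 := by
            simp at hl ⊢; omega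
          have := ih [] (out ++ [pvMClean rcur.reverse]) hlt
          simp only [List.reverse_nil, pvMClean_nil, List.all_nil] at this
          rw [this]
          have : 20 - (out ++ [pvMClean rcur.reverse]).length = 19 - out.length := by
            simp only [List.length_append, List.length_cons, List.length_nil]; omega
          rw [this]
          simp
      · rw [if_neg hk]
        have hmach := ih [] out hout
        simp only [List.reverse_nil, pvMClean_nil, List.all_nil] at hmach
        rw [hmach]
        cases hre : rcur.isEmpty with
        | true => simp
        | false =>
          simp only [Bool.false_eq_true, if_false]
          rw [go_acc rest [] [rcur.reverse]]
          simp only [List.reverse_cons, List.reverse_nil, List.nil_append, List.cons_append,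
            List.map_cons, List.filter_cons]
          rw [← pvMClean_eq_pvClean]
          simp [hk]
    · have hgo : PySem.Chars.split₀.go (c :: rest) rcur [] = PySem.Chars.split₀.go rest (c :: rcur) [] := by
        simp only [PySem.Chars.split₀.go]
        rw [if_neg hsp]
      rw [hgo]
      by_cases hp : pvIsPunct c = true
      · have h1 : pvMClean ((c :: rcur).reverse) = pvMClean rcur.reverse := by
          simp [pvMClean, List.filter_append, hp]
        have := ih (c :: rcur) out hout
        rw [h1] at this
        rw [← this]
        simp only [pvScan]
        rw [if_neg hsp, if_pos hp]
      · have h1 : pvMClean ((c :: rcur).reverse) = pvMClean rcur.reverse ++ [PySem.Chars.lowerChar c] := by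
          simp [pvMClean, List.filter_append, hp]
        have := ih (c :: rcur) out hout
        rw [h1] at this
        rw [← this]
        simp only [pvScan]
        rw [if_neg hsp, if_neg hp]
        simp [List.all_append]

-- ===== VERDICT (by name: the statement is the Claim_ definition above) =====
theorem clean_descriptions_A_normal (desc : String) :
    clean_descriptions desc =
      String.ofList (PySem.Chars.join [' ']
        ((((PySem.Chars.split₀ desc.toList).map pvClean).filter pvKeep).take 20)) := by
  unfold clean_descriptions
  dsimp only
  have hmin : ∀ (l : List (List Char)),
      PySem.List.slice l none (some (min (l.length : Int) 20)) = l.take 20 := by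
    intro l
    rw [PySem.List.slice_to (xs := l) (b := min (l.length : Int) 20) (by positivity)]
    have h : ((min (l.length : Int) 20)).toNat = min l.length 20 := by omega
    rw [h, min_comm, ← List.take_take, List.take_length]
  rw [hmin]
  congr 2
  simp only [List.map_map, List.filter_filter]
  have hF : (pvTranslateDelPunct ∘ PySem.Chars.lower) = pvClean := rfl
  have hP : (fun a => PySem.Chars.strIsalpha a && decide (1 < PySem.Chars.len a)) = pvKeep := by
    funext a
    simp [pvKeep, Bool.and_comm]
  rw [hF, hP]

theorem clean_descriptions_spec : Claim_equal_clean_descriptions := by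
  intro desc _
  unfold Spec_clean_descriptions clean_descriptions_alt
  rw [clean_descriptions_A_normal]
  have := pvScan_eq desc.toList [] [] (by simp)
  simp only [List.reverse_nil, pvMClean_nil, List.all_nil, List.nil_append] at this
  rw [this]
  rfl
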